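-- pv_equiv track=rewrite | github.com/unicamp-dl/Lissard | src/repeat_copy_logic/spanish.py | x_all_the_world
-- ===== SOURCE A (Python) =====
-- def x_all_the_world(times):
--     '''
--     Repita 'el mundo entero' 7 veces y cada segunda vez agregue 'es un escenario'
--     '''
--     out = ''
--     count = 0
--     range_ = int(times/2)
--     for x in range(0, times+range_):
--         if count == 2:
--             out+='es un escenario '
--             count=0
--         else:
--             out+='el mundo entero '
--             count+=1
--     return out.strip()
-- ===== SOURCE B (Python) =====
-- def x_all_the_world(times):
--     n = times + int(times / 2)
--     if n <= 0:
--         return ''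
--     q, r = divmod(n, 3)
--     return ('el mundo entero el mundo entero es un escenario ' * q
--             + 'el mundo entero ' * r).strip()
-- ===== Notes on version B (the rewrite author's own statement) =====
-- stated objective: simpler
-- what changed: Replaces the per-iteration stateful counter loop with a closed-form computation: N = times + int(times/2), then divmod(N, 3) gives how many full 'el mundo entero el mundo entero es un escenario ' periods and leftover 'el mundo entero ' tokens to concatenate by string multiplication. (measured ~1.9x faster at large n: one bulk string multiplication instead of per-iteration appends).
import Mathlib
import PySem

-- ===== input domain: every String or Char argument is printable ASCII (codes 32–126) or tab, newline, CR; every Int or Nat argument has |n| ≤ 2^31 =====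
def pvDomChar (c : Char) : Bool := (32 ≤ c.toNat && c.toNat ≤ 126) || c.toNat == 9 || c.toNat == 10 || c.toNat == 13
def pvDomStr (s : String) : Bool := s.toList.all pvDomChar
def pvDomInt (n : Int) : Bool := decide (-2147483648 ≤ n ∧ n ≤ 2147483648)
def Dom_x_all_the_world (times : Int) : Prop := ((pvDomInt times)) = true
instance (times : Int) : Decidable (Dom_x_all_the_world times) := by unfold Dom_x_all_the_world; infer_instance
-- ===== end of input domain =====

-- B replaces A's per-iteration counter loop by a closed-form divmod-by-3 period/remainder construction (simpler).


-- ===== PORT A =====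
-- loop body of A: state (out, count)
def pvStepA (s : String × Int) : String × Int :=
  if s.2 == 2 then (s.1 ++ "es un escenario ", 0) else (s.1 ++ "el mundo entero ", s.2 + 1)

def x_all_the_world (times : Int) : String :=
  -- int(times/2): float division then int(); exact truncating division for |times| ≤ 2^31
  let range_ : Int := PySem.Int.truncdiv times 2
  let st := (PySem.List.pyRange 0 (times + range_) 1).foldl (fun s _ => pvStepA s) ("", 0)
  PySem.Str.strip st.1

-- ===== PORT B =====
-- Python 'str * int' (empty for n ≤ 0)
def pvStrMul (s : String) (n : Int) : String :=
  String.ofList (PySem.List.pyRepeat s.toList n)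

def x_all_the_world_alt (times : Int) : String :=
  let n := times + PySem.Int.truncdiv times 2
  if n ≤ 0 then ""
  else
    let q := PySem.Int.floordiv n 3
    let r := PySem.Int.mod n 3
    PySem.Str.strip (pvStrMul "el mundo entero el mundo entero es un escenario " q ++
      pvStrMul "el mundo entero " r)

-- ===== PRECONDITION & SPEC =====
def Spec_x_all_the_world (times : Int) (out : String) : Prop := out = x_all_the_world_alt times
instance (times : Int) (out : String) : Decidable (Spec_x_all_the_world times out) := by unfold Spec_x_all_the_world; infer_instance

-- ===== CLAIM (what is proved, stated in full; the proofs are below) =====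
def Claim_equal_x_all_the_world : Prop := ∀ (times : Int), Dom_x_all_the_world times → Spec_x_all_the_world times (x_all_the_world times)

-- ===== LEMMAS AND PROOFS =====

-- a fold whose body ignores the element is an iterate of the body
theorem pv_foldl_const {S α : Type} (f : S → S) :
    ∀ (l : List α) (init : S), l.foldl (fun s _ => f s) init = f^[l.length] init := by
  intro l
  induction l with
  | nil => intro init; simp
  | cons a t ih =>
      intro init
      simp [List.foldl, ih, Function.iterate_succ_apply]

-- k copies of s, appended on the right
def pvRep (s : String) : Nat → String
  | 0 => ""
  | k + 1 => pvRep s k ++ s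

theorem pvRep_comm (s : String) : ∀ k : Nat, s ++ pvRep s k = pvRep s k ++ s := by
  intro k
  induction k with
  | zero => simp [pvRep]
  | succ k ih => simp [pvRep, ← String.append_assoc, ih]

theorem pvStrMul_natCast (s : String) : ∀ m : Nat, pvStrMul s (m : Int) = pvRep s m := by
  intro m
  induction m with
  | zero => rfl
  | succ m ih =>
      have h : pvStrMul s ((m + 1 : Nat) : Int) = s ++ pvStrMul s (m : Int) := by
        simp [pvStrMul, PySem.List.pyRepeat, List.replicate_succ]
      rw [h, ih, pvRep_comm, pvRep]

-- closed form of A's loop state after k iterations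
theorem pvIterA (k : Nat) :
    pvStepA^[k] ("", 0) =
      (pvRep "el mundo entero el mundo entero es un escenario " (k / 3) ++
        pvRep "el mundo entero " (k % 3), ((k % 3 : Nat) : Int)) := by
  induction k with
  | zero => rfl
  | succ k ih =>
      rw [Function.iterate_succ_apply', ih]
      rcases (by omega : k % 3 = 0 ∨ k % 3 = 1 ∨ k % 3 = 2) with h | h | h
      · have hd : (k + 1) / 3 = k / 3 := by omega
        have hm : (k + 1) % 3 = 1 := by omega
        simp [pvStepA, h, hd, hm, pvRep]
      · have hd : (k + 1) / 3 = k / 3 := by omega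
        have hm : (k + 1) % 3 = 2 := by omega
        simp [pvStepA, h, hd, hm, pvRep, String.append_assoc]
      · have hd : (k + 1) / 3 = k / 3 + 1 := by omega
        have hm : (k + 1) % 3 = 0 := by omega
        simp [pvStepA, h, hd, hm, pvRep, String.append_assoc]

-- ===== VERDICT (by name: the statement is the Claim_ definition above) =====
theorem x_all_the_world_spec : Claim_equal_x_all_the_world := by
  intro times _
  unfold Spec_x_all_the_world x_all_the_world x_all_the_world_alt
  dsimp only
  set n := times + PySem.Int.truncdiv times 2 with hn
  by_cases hle : n ≤ 0
  · rw [if_pos hle, PySem.List.pyRange_one_eq_nil hle]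
    rfl
  · rw [if_neg hle]
    replace hle : 0 < n := by omega
    obtain ⟨k, hk⟩ : ∃ k : Nat, n = (k : Int) := ⟨n.toNat, (Int.toNat_of_nonneg (le_of_lt hle)).symm⟩
    rw [pv_foldl_const, PySem.List.length_pyRange_one, hk]
    have hq : PySem.Int.floordiv ((k : Nat) : Int) 3 = ((k / 3 : Nat) : Int) := by
      exact_mod_cast PySem.Int.floordiv_natCast k 3
    have hr : PySem.Int.mod ((k : Nat) : Int) 3 = ((k % 3 : Nat) : Int) := by
      exact_mod_cast PySem.Int.mod_natCast k 3
    rw [hq, hr, pvStrMul_natCast, pvStrMul_natCast]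
    have : (((k : Int) - 0).toNat) = k := by omega
    rw [this, pvIterA]
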